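-- pv_equiv track=rewrite | github.com/leatham22/Friend-convenient-meetup | check_disconnected_stations.py | check_reachability
-- ===== SOURCE A (Python) =====
-- from collections import deque, defaultdict
-- from typing import Dict, List, Set, Tuple
--
-- def check_reachability(graph: Dict[str, Dict[str, float]], start_station: str) -> Tuple[Set[str], Set[str]]:
--     """
--     Check which stations can be reached from the start station,
--     and which stations can reach the start station.
--
--     Args:
--         graph: The station graph
--         start_station: The starting station
--
--     Returns:
--         Tuple containing:
--         1. Set of stations reachable from the start station
--         2. Set of stations that can reach the start station
--     """
--     # Find stations reachable from the start station
--     reachable_from_start = set()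
--     queue = deque([start_station])
--     visited = {start_station}
--
--     while queue:
--         station = queue.popleft()
--         reachable_from_start.add(station)
--
--         for neighbor in graph.get(station, {}):
--             if neighbor not in visited:
--                 queue.append(neighbor)
--                 visited.add(neighbor)
--
--     # Create a reversed graph
--     reversed_graph = defaultdict(dict)
--     for station, connections in graph.items():
--         for connected_station, time in connections.items():
--             reversed_graph[connected_station][station] = time
--
--     # Find stations that can reach the start station
--     can_reach_start = set()
--     queue = deque([start_station])
--     visited = {start_station}
--
--     while queue:
--         station = queue.popleft()
--         can_reach_start.add(station)
--
--         for neighbor in reversed_graph.get(station, {}):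
--             if neighbor not in visited:
--                 queue.append(neighbor)
--                 visited.add(neighbor)
--
--     return reachable_from_start, can_reach_start
-- ===== SOURCE B (Python) =====
-- def check_reachability(graph, start_station):
--     """Same result as A: (stations reachable from start, stations that can reach start).
--
--     Different shape: one growing visit-order list with a cursor instead of
--     deque + visited-set + result-set, and the backward search scans the graph
--     for predecessors on demand instead of materialising a reversed graph.
--     """
--     def grow(neighbors_of):
--         order = [start_station]
--         i = 0
--         while i < len(order):
--             for n in neighbors_of(order[i]):
--                 if n not in order:
--                     order.append(n)
--             i += 1
--         return order
--
--     forward = grow(lambda s: graph.get(s, {}))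
--     backward = grow(lambda s: [u for u, conns in graph.items() if s in conns])
--     return set(forward), set(backward)
-- ===== Notes on version B (the rewrite author's own statement) =====
-- stated objective: simpler
-- what changed: Each BFS keeps one growing visit-order list with a cursor (no deque, no separate visited/result sets), and the backward search finds predecessors by scanning the graph entries on demand instead of first building a reversed adjacency index.
import Mathlib
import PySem

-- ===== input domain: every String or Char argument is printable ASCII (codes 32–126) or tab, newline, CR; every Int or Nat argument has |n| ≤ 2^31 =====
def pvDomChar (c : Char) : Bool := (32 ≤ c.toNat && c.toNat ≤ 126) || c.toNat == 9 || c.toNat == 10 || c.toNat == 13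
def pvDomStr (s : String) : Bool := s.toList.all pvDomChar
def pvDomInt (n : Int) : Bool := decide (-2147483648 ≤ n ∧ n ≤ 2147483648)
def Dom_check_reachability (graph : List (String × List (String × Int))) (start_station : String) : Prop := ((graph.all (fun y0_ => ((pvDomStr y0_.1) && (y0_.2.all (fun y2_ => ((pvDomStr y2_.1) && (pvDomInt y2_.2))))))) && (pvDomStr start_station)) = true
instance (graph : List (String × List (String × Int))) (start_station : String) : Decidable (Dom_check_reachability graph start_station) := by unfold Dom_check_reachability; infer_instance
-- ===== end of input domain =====

-- B keeps one growing visit-order list with a cursor (no deque / visited set / result set)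
-- and scans the graph for predecessors on demand instead of building a reversed graph;
-- objective: simpler.

-- ===== PORT A =====
-- Python dicts arrive as unique-key association lists; these are the exact dict
-- primitives on that encoding (lookup / in-place overwrite = first key match).
def pvGetD {α : Type} (d : List (String × α)) (k : String) (dflt : α) : α :=
  match d with
  | [] => dflt
  | p :: rest => if p.1 == k then p.2 else pvGetD rest k dflt

def pvKeys {α : Type} (d : List (String × α)) : List String := d.map Prod.fst

def pvInsert {α : Type} (d : List (String × α)) (k : String) (v : α) : List (String × α) :=
  match d with
  | [] => [(k, v)]
  | p :: rest => if p.1 == k then (k, v) :: rest else p :: pvInsert rest k v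

-- 'for neighbor in graph.get(station, {})'
def pvNbrs (g : List (String × List (String × Int))) (s : String) : List String :=
  pvKeys (pvGetD g s [])

-- (termination bookkeeping only) all strings that can ever be appended to a queue
def pvAllKeys (g : List (String × List (String × Int))) : List String :=
  g.flatMap (fun p => pvKeys p.2)

-- body of 'for neighbor in …: if neighbor not in visited: queue.append; visited.add'
def pvStepA (p : List String × List String) (n : String) : List String × List String :=
  if PySem.Set.contains p.2 n then p else (p.1 ++ [n], PySem.Set.add p.2 n)

-- ----- termination bookkeeping (cited by the ports' decreasing_by) -----
-- the elements a scan of ns newly adds to the visited list v, in order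
def pvDlist : List String → List String → List String
  | [], _ => []
  | n :: ns, v => if v.contains n then pvDlist ns v else n :: pvDlist ns (v ++ [n])

lemma pvDlist_foldA : ∀ (ns q v : List String),
    ns.foldl pvStepA (q, v) = (q ++ pvDlist ns v, v ++ pvDlist ns v) := by
  intro ns
  induction ns with
  | nil => intro q v; simp [pvDlist]
  | cons n ns ih =>
    intro q v
    by_cases h : n ∈ v
    · simp [pvStepA, pvDlist, h, ih]
    · simp [pvStepA, pvDlist, PySem.Set.add, h, ih, List.append_assoc]

lemma pvDlist_mem : ∀ (ns v : List String) (x : String),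
    x ∈ pvDlist ns v → x ∈ ns ∧ x ∉ v := by
  intro ns
  induction ns with
  | nil => intro v x hx; simp [pvDlist] at hx
  | cons n ns ih =>
    intro v x hx
    simp only [pvDlist] at hx
    by_cases h : n ∈ v
    · simp only [h, decide_true, List.contains_iff_mem, if_pos] at hx
      rcases ih v x hx with ⟨h1, h2⟩
      exact ⟨List.mem_cons_of_mem _ h1, h2⟩
    · simp only [List.contains_iff_mem, h, if_neg, if_false, decide_false] at hx
      rcases List.mem_cons.mp hx with rfl | hx'
      · exact ⟨List.mem_cons_self, h⟩
      · rcases ih _ x hx' with ⟨h1, h2⟩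
        refine ⟨List.mem_cons_of_mem _ h1, fun hv => h2 (by simp [hv])⟩

def pvFresh (U v : List String) : Nat := (U.filter (fun x => !v.contains x)).length

lemma pvFresh_sub (U v d : List String) :
    List.Sublist (U.filter (fun x => !(v ++ d).contains x))
      (U.filter (fun x => !v.contains x)) :=
  List.monotone_filter_right U (fun a h => by
    rw [Bool.not_eq_true'] at h ⊢
    rw [Bool.eq_false_iff] at h ⊢
    intro hc
    exact h (by
      rw [List.contains_iff_mem] at hc ⊢
      exact List.mem_append.mpr (Or.inl hc)))

lemma pvFresh_le (U v d : List String) : pvFresh U (v ++ d) ≤ pvFresh U v :=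
  (pvFresh_sub U v d).length_le

lemma pvFresh_lt (U v d : List String) (x0 : String) (h0 : x0 ∈ d) (hU : x0 ∈ U)
    (hfresh : ∀ x ∈ d, x ∉ v) : pvFresh U (v ++ d) < pvFresh U v := by
  refine Nat.lt_of_le_of_ne (pvFresh_le U v d) fun heq => ?_
  have hlists : U.filter (fun x => !(v ++ d).contains x)
      = U.filter (fun x => !v.contains x) := (pvFresh_sub U v d).eq_of_length heq
  have hx : x0 ∈ U.filter (fun x => !v.contains x) := by
    rw [List.mem_filter]
    exact ⟨hU, by simp [List.contains_iff_mem, hfresh x0 h0]⟩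
  rw [← hlists] at hx
  rcases List.mem_filter.mp hx with ⟨-, hcond⟩
  rw [Bool.not_eq_true', Bool.eq_false_iff] at hcond
  exact hcond (by rw [List.contains_iff_mem]; exact List.mem_append.mpr (Or.inr h0))

lemma pvNbrs_sub (g : List (String × List (String × Int))) (s : String) :
    ∀ x ∈ pvNbrs g s, x ∈ pvAllKeys g := by
  induction g with
  | nil => intro x hx; simp [pvNbrs, pvGetD, pvKeys] at hx
  | cons p g ih =>
    intro x hx
    simp only [pvNbrs, pvGetD] at hx
    by_cases h : p.1 == s
    · simp only [if_pos h] at hx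
      simp [pvAllKeys, pvKeys]
      exact Or.inl (by simpa [pvKeys] using hx)
    · simp only [if_neg h] at hx
      simp only [pvAllKeys, List.flatMap_cons, List.mem_append]
      exact Or.inr (ih x hx)

-- ----- the two BFS loops of A (identical Python code, run on graph and on reversed_graph) -----
def bfsA (g : List (String × List (String × Int))) :
    List String → List String → List String → List String
  | [], _, reach => reach
  | s :: qt, visited, reach =>
    bfsA g ((pvNbrs g s).foldl pvStepA (qt, visited)).1
          ((pvNbrs g s).foldl pvStepA (qt, visited)).2
          (PySem.Set.add reach s)
termination_by q v _ => (pvFresh (pvAllKeys g) v, q.length)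
decreasing_by
  rw [pvDlist_foldA]
  rcases hd : pvDlist (pvNbrs g s) visited with _ | ⟨x0, d'⟩
  · simp only [List.append_nil]
    exact Prod.Lex.right _ (by simp)
  · apply Prod.Lex.left
    apply pvFresh_lt _ _ _ x0 List.mem_cons_self
    · exact pvNbrs_sub g s x0 ((pvDlist_mem _ _ _ (by rw [hd]; exact List.mem_cons_self)).1)
    · intro x hx
      rw [← hd] at hx
      exact (pvDlist_mem _ _ _ hx).2

-- reversed_graph: defaultdict(dict); reversed_graph[connected][station] = time
def buildRev (g : List (String × List (String × Int))) : List (String × List (String × Int)) :=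
  g.foldl
    (fun rd p => p.2.foldl
      (fun rd q => pvInsert rd q.1 (pvInsert (pvGetD rd q.1 []) p.1 q.2)) rd)
    []

def check_reachability (graph : List (String × List (String × Int))) (start_station : String) : List String × List String :=
  (bfsA graph [start_station] [start_station] [],
   bfsA (buildRev graph) [start_station] [start_station] [])

-- ===== PORT B =====
-- 'if n not in order: order.append(n)'
def pvStepB (o : List String) (n : String) : List String :=
  if o.contains n then o else o ++ [n]

lemma pvDlist_foldB : ∀ (ns v : List String),
    ns.foldl pvStepB v = v ++ pvDlist ns v := by
  intro ns
  induction ns with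
  | nil => intro v; simp [pvDlist]
  | cons n ns ih =>
    intro v
    by_cases h : n ∈ v
    · simp [pvStepB, pvDlist, h, ih]
    · simp [pvStepB, pvDlist, h, ih, List.append_assoc]

-- '[u for u, conns in graph.items() if s in conns]'
def pvScanPreds (g : List (String × List (String × Int))) (s : String) : List String :=
  g.filterMap (fun p => if p.2.any (fun q => q.1 == s) then some p.1 else none)

lemma pvScanPreds_sub (g : List (String × List (String × Int))) (s : String) :
    ∀ x ∈ pvScanPreds g s, x ∈ pvKeys g := by
  intro x hx
  simp only [pvScanPreds, List.mem_filterMap] at hx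
  rcases hx with ⟨p, hp, hpx⟩
  by_cases h : p.2.any (fun q => q.1 == s)
  · simp only [if_pos h, Option.some.injEq] at hpx
    exact hpx ▸ List.mem_map_of_mem hp
  · simp [if_neg h] at hpx

-- the 'grow' loop of Source B: one list, one cursor.  U/hU are termination bookkeeping
-- only (a finite superset of everything nbrs can produce); they do not affect the value.
def growB (U : List String) (nbrs : String → List String)
    (hU : ∀ s, ∀ x ∈ nbrs s, x ∈ U) (order : List String) (i : Nat) : List String :=
  if h : i < order.length then
    growB U nbrs hU ((nbrs order[i]).foldl pvStepB order) (i + 1)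
  else order
termination_by (pvFresh U order, order.length - i)
decreasing_by
  rw [pvDlist_foldB]
  rcases hd : pvDlist (nbrs order[i]) order with _ | ⟨x0, d'⟩
  · simp only [List.append_nil]
    exact Prod.Lex.right _ (by omega)
  · apply Prod.Lex.left
    apply pvFresh_lt _ _ _ x0 List.mem_cons_self
    · exact hU _ x0 ((pvDlist_mem _ _ _ (by rw [hd]; exact List.mem_cons_self)).1)
    · intro x hx
      rw [← hd] at hx
      exact (pvDlist_mem _ _ _ hx).2

def check_reachability_alt (graph : List (String × List (String × Int))) (start_station : String) : List String × List String :=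
  (PySem.Set.ofList
     (growB (pvAllKeys graph) (fun s => pvNbrs graph s) (pvNbrs_sub graph) [start_station] 0),
   PySem.Set.ofList
     (growB (pvKeys graph) (pvScanPreds graph) (pvScanPreds_sub graph) [start_station] 0))

-- ===== PRECONDITION & SPEC =====
def Spec_check_reachability (graph : List (String × List (String × Int))) (start_station : String) (out : List String × List String) : Prop := out = check_reachability_alt graph start_station
instance (graph : List (String × List (String × Int))) (start_station : String) (out : List String × List String) : Decidable (Spec_check_reachability graph start_station out) := by unfold Spec_check_reachability; infer_instance

-- ===== CLAIM (what is proved, stated in full; the proofs are below) =====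
def Claim_equal_check_reachability : Prop := ∀ (graph : List (String × List (String × Int))) (start_station : String), Dom_check_reachability graph start_station → Spec_check_reachability graph start_station (check_reachability graph start_station)

-- ===== LEMMAS AND PROOFS =====

lemma pvDlist_nodup : ∀ (ns v : List String), (pvDlist ns v).Nodup := by
  intro ns
  induction ns with
  | nil => intro v; simp [pvDlist]
  | cons n ns ih =>
    intro v
    by_cases h : n ∈ v
    · simp [pvDlist, h, ih]
    · simp only [pvDlist, List.contains_iff_mem, h, decide_false, if_false, List.nodup_cons]
      refine ⟨fun hmem => ?_, ih _⟩
      exact (pvDlist_mem _ _ _ hmem).2 (by simp)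


lemma pvDlist_update : ∀ (ns v : List String), PySem.Set.update v ns = v ++ pvDlist ns v := by
  intro ns
  induction ns with
  | nil => intro v; simp [PySem.Set.update, pvDlist]
  | cons n ns ih =>
    intro v
    simp only [PySem.Set.update, List.foldl_cons] at ih ⊢
    by_cases h : n ∈ v
    · rw [PySem.Set.add_of_mem h, ih]
      simp [pvDlist, h]
    · rw [PySem.Set.add_of_not_mem h, ih]
      simp [pvDlist, h]

lemma pvDlist_ofList (ns v : List String) :
    pvDlist (PySem.Set.ofList ns) v = pvDlist ns v := by
  have key : PySem.Set.update v (PySem.Set.ofList ns) = PySem.Set.update v ns := by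
    rw [PySem.Set.update_eq_append_filter, PySem.Set.update_eq_append_filter,
      PySem.Set.ofList_ofList]
  have h1 := pvDlist_update (PySem.Set.ofList ns) v
  have h2 := pvDlist_update ns v
  rw [h1, h2] at key
  exact List.append_cancel_left key

lemma pvKeys_pvInsert {α : Type} (d : List (String × α)) (k : String) (v : α) :
    pvKeys (pvInsert d k v) = PySem.Set.add (pvKeys d) k := by
  induction d with
  | nil =>
    rw [PySem.Set.add_of_not_mem (by simp [pvKeys])]
    simp [pvKeys, pvInsert]
  | cons p d ih =>
    by_cases h : p.1 = k
    · rw [PySem.Set.add_of_mem (show k ∈ pvKeys (p :: d) by simp [pvKeys]; exact Or.inl h.symm)]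
      simp [pvInsert, pvKeys, h]
    · have hkeys : pvKeys (p :: pvInsert d k v) = p.1 :: pvKeys (pvInsert d k v) := by
        simp [pvKeys]
      have hcons : pvKeys (p :: d) = p.1 :: pvKeys d := by simp [pvKeys]
      have hstep : pvInsert (p :: d) k v = p :: pvInsert d k v := by
        simp [pvInsert, h]
      rw [hstep, hkeys, ih, hcons]
      by_cases hk : k ∈ pvKeys d
      · rw [PySem.Set.add_of_mem hk, PySem.Set.add_of_mem (List.mem_cons_of_mem _ hk)]
      · rw [PySem.Set.add_of_not_mem hk, PySem.Set.add_of_not_mem (by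
          simp only [List.mem_cons]
          exact fun hc => hc.elim (fun e => h e.symm) hk)]
        simp

lemma pvGetD_pvInsert_self {α : Type} (d : List (String × α)) (k : String) (v : α) (dflt : α) :
    pvGetD (pvInsert d k v) k dflt = v := by
  induction d with
  | nil => simp [pvInsert, pvGetD]
  | cons p d ih =>
    by_cases h : p.1 = k
    · simp [pvInsert, pvGetD, h]
    · simp [pvInsert, pvGetD, h, ih]

lemma pvGetD_pvInsert_ne {α : Type} (d : List (String × α)) (k s : String) (v : α) (dflt : α)
    (h : s ≠ k) : pvGetD (pvInsert d k v) s dflt = pvGetD d s dflt := by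
  induction d with
  | nil => simp [pvInsert, pvGetD, Ne.symm h]
  | cons p d ih =>
    by_cases hp : p.1 = k
    · simp [pvInsert, pvGetD, hp, Ne.symm h, h]
    · by_cases hs : p.1 = s
      · simp [pvInsert, pvGetD, hp, hs, h]
      · simp [pvInsert, pvGetD, hp, hs, h, ih]

-- one entry (u, its) of the reversed-graph build, seen at key s
lemma revInner (u s : String) :
    ∀ (its : List (String × Int)) (rd : List (String × List (String × Int))),
      pvKeys (pvGetD (its.foldl
          (fun rd q => pvInsert rd q.1 (pvInsert (pvGetD rd q.1 []) u q.2)) rd) s [])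
        = if its.any (fun q => q.1 == s) then PySem.Set.add (pvKeys (pvGetD rd s [])) u
          else pvKeys (pvGetD rd s []) := by
  intro its
  induction its with
  | nil => intro rd; simp
  | cons q its ih =>
    intro rd
    simp only [List.foldl_cons, List.any_cons]
    rw [ih]
    by_cases hq : q.1 = s
    · subst hq
      rw [pvGetD_pvInsert_self, pvKeys_pvInsert]
      by_cases hrest : its.any (fun p => p.1 == q.1)
      · simp only [hrest, beq_self_eq_true, Bool.true_or, if_true]
        rw [PySem.Set.add_of_mem ((PySem.Set.mem_add _ _ _).mpr (Or.inr rfl))]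
      · simp [hrest]
    · rw [pvGetD_pvInsert_ne _ _ _ _ _ (fun he => hq he.symm)]
      by_cases hrest : its.any (fun q => q.1 == s) <;>
        simp [hq, hrest]

lemma revOuter (s : String) :
    ∀ (g : List (String × List (String × Int))) (rd : List (String × List (String × Int))),
      pvKeys (pvGetD (g.foldl
          (fun rd p => p.2.foldl
            (fun rd q => pvInsert rd q.1 (pvInsert (pvGetD rd q.1 []) p.1 q.2)) rd) rd) s [])
        = PySem.Set.update (pvKeys (pvGetD rd s [])) (pvScanPreds g s) := by
  intro g
  induction g with
  | nil => intro rd; simp [pvScanPreds, PySem.Set.update]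
  | cons p g ih =>
    intro rd
    simp only [List.foldl_cons]
    rw [ih, revInner]
    by_cases hp : p.2.any (fun q => q.1 == s)
    · simp only [hp, if_true]
      rw [show pvScanPreds (p :: g) s = p.1 :: pvScanPreds g s by
        simp [pvScanPreds, List.filterMap_cons, hp]]
      rw [PySem.Set.update_cons]
    · simp only [hp, Bool.false_eq_true, if_false]
      rw [show pvScanPreds (p :: g) s = pvScanPreds g s by
        simp [pvScanPreds, List.filterMap_cons, hp]]

lemma revKeys (g : List (String × List (String × Int))) (s : String) :
    pvNbrs (buildRev g) s = PySem.Set.ofList (pvScanPreds g s) := by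
  rw [pvNbrs, buildRev, revOuter]
  simp [pvGetD, pvKeys, PySem.Set.update_nil_left]

lemma lockstep (g : List (String × List (String × Int))) (U : List String)
    (nbrs : String → List String) (hU : ∀ s, ∀ x ∈ nbrs s, x ∈ U)
    (hn : ∀ s v, pvDlist (nbrs s) v = pvDlist (pvNbrs g s) v) :
    ∀ (order : List String) (i : Nat), i ≤ order.length → order.Nodup →
      bfsA g (order.drop i) order (order.take i) = growB U nbrs hU order i := by
  intro order i
  fun_induction growB U nbrs hU order i with
  | case1 order i h ih =>
    intro hle hnd
    rw [pvDlist_foldB] at ih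
    have hdrop : order.drop i = order[i] :: order.drop (i + 1) :=
      List.drop_eq_getElem_cons h
    rw [hdrop, bfsA]
    rw [pvDlist_foldA, ← hn order[i] order, pvDlist_foldB]
    have hnotmem : order[i] ∉ order.take i := by
      have hnd' := hnd
      rw [← List.take_append_drop i order, List.nodup_append] at hnd'
      exact fun hmem => hnd'.2.2 _ hmem _ (by rw [hdrop]; exact List.mem_cons_self) rfl
    have hadd : PySem.Set.add (order.take i) order[i] = order.take (i + 1) := by
      rw [PySem.Set.add_of_not_mem hnotmem, List.take_add_one]
      simp [List.getElem?_eq_getElem h]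
    have hfresh : ∀ x ∈ pvDlist (nbrs order[i]) order, x ∉ order := by
      intro x hx
      exact (pvDlist_mem _ _ _ hx).2
    have hnd2 : (order ++ pvDlist (nbrs order[i]) order).Nodup := by
      rw [List.nodup_append]
      exact ⟨hnd, pvDlist_nodup _ _, fun a ha b hb he => hfresh b hb (he ▸ ha)⟩
    have hle2 : i + 1 ≤ (order ++ pvDlist (nbrs order[i]) order).length := by
      rw [List.length_append]; omega
    have := ih hle2 hnd2
    rw [List.drop_append_of_le_length (by omega), List.take_append_of_le_length (by omega)]
      at this
    rw [hadd]
    exact this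
  | case2 order i h =>
    intro hle _
    have hi : i = order.length := by omega
    rw [hi, List.drop_length, List.take_length, bfsA]

lemma growB_nodup (U : List String) (nbrs : String → List String)
    (hU : ∀ s, ∀ x ∈ nbrs s, x ∈ U) :
    ∀ (order : List String) (i : Nat), order.Nodup → (growB U nbrs hU order i).Nodup := by
  intro order i
  fun_induction growB U nbrs hU order i with
  | case1 order i h ih =>
    intro hnd
    apply ih
    rw [pvDlist_foldB, List.nodup_append]
    exact ⟨hnd, pvDlist_nodup _ _, fun a ha b hb he => (pvDlist_mem _ _ _ hb).2 (he ▸ ha)⟩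
  | case2 order i h => intro hnd; exact hnd

-- ===== VERDICT (by name: the statement is the Claim_ definition above) =====
theorem check_reachability_spec : Claim_equal_check_reachability := by
  intro graph start_station _
  unfold Spec_check_reachability check_reachability check_reachability_alt
  have hfwd := lockstep graph (pvAllKeys graph) (fun s => pvNbrs graph s)
    (pvNbrs_sub graph) (fun s v => rfl) [start_station] 0 (by simp) (by simp)
  have hbwd := lockstep (buildRev graph) (pvKeys graph) (pvScanPreds graph)
    (pvScanPreds_sub graph)
    (fun s v => by rw [revKeys graph s, pvDlist_ofList]) [start_station] 0
    (by simp) (by simp)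
  simp only [List.drop_zero, List.take_zero] at hfwd hbwd
  rw [hfwd, hbwd,
    PySem.Set.ofList_eq_self_of_nodup _
      (growB_nodup (pvAllKeys graph) (fun s => pvNbrs graph s) (pvNbrs_sub graph)
        [start_station] 0 (by simp)),
    PySem.Set.ofList_eq_self_of_nodup _
      (growB_nodup (pvKeys graph) (pvScanPreds graph) (pvScanPreds_sub graph)
        [start_station] 0 (by simp))]
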